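-- pv_equiv track=rewrite | github.com/gauravrana05/ProblemsDaily | gaurav/Courses/PDSA/Live Sessions/Week1/sumsquare.py | sumsquare
-- ===== SOURCE A (Python) =====
-- def sumsquare(L):
--     """
--     Returns the sum of squares of odd and even numbers in the list.
--     """
--     odd_sum = 0
--     even_sum = 0
--
--     for num in L:
--         if num % 2 == 0:
--             even_sum += num**2
--         else:
--             odd_sum += num**2
--
--     return [odd_sum, even_sum]
-- ===== SOURCE B (Python) =====
-- def sumsquare(L):
--     """Sum of squares of odd and even numbers: two filtered reductions instead of one branching loop."""
--     odd_sum = sum(n ** 2 for n in L if n % 2 != 0)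
--     even_sum = sum(n ** 2 for n in L if n % 2 == 0)
--     return [odd_sum, even_sum]
-- ===== Notes on version B (the rewrite author's own statement) =====
-- stated objective: idiomatic
-- what changed: Replaced the single accumulating loop with an if/else branch by two independent filtered generator-expression sums, one per parity.
import Mathlib
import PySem

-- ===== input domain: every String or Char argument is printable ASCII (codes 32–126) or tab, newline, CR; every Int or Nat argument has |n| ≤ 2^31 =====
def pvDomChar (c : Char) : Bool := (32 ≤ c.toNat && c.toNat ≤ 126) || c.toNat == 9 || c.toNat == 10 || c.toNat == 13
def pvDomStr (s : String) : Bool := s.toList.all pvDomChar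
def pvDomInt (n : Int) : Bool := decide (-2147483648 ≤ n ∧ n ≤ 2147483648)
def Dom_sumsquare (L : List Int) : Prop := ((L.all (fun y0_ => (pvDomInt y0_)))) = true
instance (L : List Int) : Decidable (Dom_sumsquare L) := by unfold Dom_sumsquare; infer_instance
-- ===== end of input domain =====

-- ===== PORT A =====
-- B replaces A's single branching loop by two independent filtered sums (one per parity); same values.
def sumsquare (L : List Int) : List Int :=
  let p := L.foldl (fun (st : Int × Int) num =>
    if PySem.Int.mod num 2 = 0 then (st.1, st.2 + num ^ 2) else (st.1 + num ^ 2, st.2)) (0, 0)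
  [p.1, p.2]

-- ===== PORT B =====
def sumsquare_alt (L : List Int) : List Int :=
  let odd_sum := ((L.filter (fun n => PySem.Int.mod n 2 ≠ 0)).map (fun n => n ^ 2)).sum
  let even_sum := ((L.filter (fun n => PySem.Int.mod n 2 = 0)).map (fun n => n ^ 2)).sum
  [odd_sum, even_sum]

-- ===== PRECONDITION & SPEC =====
def Spec_sumsquare (L : List Int) (out : List Int) : Prop := out = sumsquare_alt L
instance (L : List Int) (out : List Int) : Decidable (Spec_sumsquare L out) := by unfold Spec_sumsquare; infer_instance

-- ===== CLAIM (what is proved, stated in full; the proofs are below) =====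
def Claim_equal_sumsquare : Prop := ∀ (L : List Int), Dom_sumsquare L → Spec_sumsquare L (sumsquare L)

-- ===== LEMMAS AND PROOFS =====

-- ===== VERDICT (by name: the statement is the Claim_ definition above) =====
lemma sumsquare_fold (L : List Int) (a b : Int) :
    L.foldl (fun (st : Int × Int) num =>
      if PySem.Int.mod num 2 = 0 then (st.1, st.2 + num ^ 2) else (st.1 + num ^ 2, st.2)) (a, b)
    = (a + ((L.filter (fun n => PySem.Int.mod n 2 ≠ 0)).map (fun n => n ^ 2)).sum,
       b + ((L.filter (fun n => PySem.Int.mod n 2 = 0)).map (fun n => n ^ 2)).sum) := by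
  induction L generalizing a b with
  | nil => simp
  | cons x xs ih =>
    by_cases h : PySem.Int.mod x 2 = 0
    · rw [List.foldl_cons, if_pos h, ih, List.filter_cons, List.filter_cons]
      have h2 : (2 : Int) ∣ x := by simpa using h
      have h1 : ¬ x % 2 = 1 := by omega
      simp [h2, h1]
      ring
    · rw [List.foldl_cons, if_neg h, ih, List.filter_cons, List.filter_cons]
      have h2 : ¬ (2 : Int) ∣ x := by simpa using h
      have h1 : x % 2 = 1 := by omega
      simp [h2, h1]
      ring

theorem sumsquare_spec : Claim_equal_sumsquare := by
  intro L _
  unfold Spec_sumsquare sumsquare sumsquare_alt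
  simp only [sumsquare_fold]
  simp
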